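-- pv_equiv track=rewrite | github.com/aarhusstadsarkiv/backup | src/backup/id_field_list_ops.py | greater_than
-- ===== SOURCE A (Python) =====
-- def greater_than(fieldvalues: list, value: str) -> bool:
--     if fieldvalues == []:
--         return False
--     else:
--         for x in range(0, len(fieldvalues), 1):
--             entry_content_int = fieldvalues[x].split(";")[0]
--             if value < entry_content_int:
--                 return True
--
--         return False
-- ===== SOURCE B (Python) =====
-- def greater_than(fieldvalues: list, value: str) -> bool:
--     return bool(fieldvalues) and value < max(f.split(";")[0] for f in fieldvalues)
-- ===== Notes on version B (the rewrite author's own statement) =====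
-- stated objective: alternative
-- what changed: Replaces the index-driven first-match scan with early exit by a single max-reduction over all ';'-prefixes followed by one comparison against value.
import Mathlib
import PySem

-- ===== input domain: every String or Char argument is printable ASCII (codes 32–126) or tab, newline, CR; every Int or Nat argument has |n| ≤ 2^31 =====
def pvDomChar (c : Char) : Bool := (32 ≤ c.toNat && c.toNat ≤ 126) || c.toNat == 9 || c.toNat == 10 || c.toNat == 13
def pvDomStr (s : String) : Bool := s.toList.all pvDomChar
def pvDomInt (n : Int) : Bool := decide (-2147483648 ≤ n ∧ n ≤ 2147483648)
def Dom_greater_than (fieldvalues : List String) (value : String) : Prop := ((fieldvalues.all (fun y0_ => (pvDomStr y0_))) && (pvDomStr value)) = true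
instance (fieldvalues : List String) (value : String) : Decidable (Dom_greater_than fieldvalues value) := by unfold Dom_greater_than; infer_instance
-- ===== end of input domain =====

-- B replaces A's index-driven first-match scan (early exit) by a single max-reduction
-- over all ';'-prefixes followed by one comparison; same cost, different shape.

-- ===== PORT A =====
-- split(";") with the non-empty literal separator never raises, so .getD [] is never taken.
def greater_than (fieldvalues : List String) (value : String) : Bool :=
  if fieldvalues = [] then
    false
  else
    (PySem.List.pyRange 0 (PySem.List.len fieldvalues) 1).any (fun x =>
      let entry_content_int :=
        PySem.List.pyGetD ((PySem.Str.split? (PySem.List.pyGetD fieldvalues x "") ";").getD []) 0 ""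
      decide (value < entry_content_int))

-- ===== PORT B =====
-- Python's max(...) over the generator is PySem.List.max? of the mapped list (no key).
def greater_than_alt (fieldvalues : List String) (value : String) : Bool :=
  !fieldvalues.isEmpty &&
    (match PySem.List.max?
        (fieldvalues.map (fun f =>
          PySem.List.pyGetD ((PySem.Str.split? f ";").getD []) 0 ""))
        (fun y => y) with
     | none => false
     | some m => decide (value < m))

-- ===== PRECONDITION & SPEC =====
def Spec_greater_than (fieldvalues : List String) (value : String) (out : Bool) : Prop := out = greater_than_alt fieldvalues value
instance (fieldvalues : List String) (value : String) (out : Bool) : Decidable (Spec_greater_than fieldvalues value out) := by unfold Spec_greater_than; infer_instance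

-- ===== CLAIM (what is proved, stated in full; the proofs are below) =====
def Claim_equal_greater_than : Prop := ∀ (fieldvalues : List String) (value : String), Dom_greater_than fieldvalues value → Spec_greater_than fieldvalues value (greater_than fieldvalues value)

-- ===== LEMMAS AND PROOFS =====

-- A's index loop over range(0, len, 1) is the direct scan of the list.
theorem pv_any_range (fv : List String) (p : String → Bool) :
    (PySem.List.pyRange 0 (PySem.List.len fv) 1).any (fun x => p (PySem.List.pyGetD fv x "")) =
      fv.any p := by
  conv_rhs => rw [← PySem.List.map_pyGetD_pyRange_zero fv ""]
  rw [List.any_map]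
  rfl

-- "value < running max" is "value is below some element" (plus the seed).
theorem pv_lt_foldl_max (v : String) :
    ∀ (l : List String) (a : String),
      decide (v < l.foldl max a) = (decide (v < a) || l.any (fun m => decide (v < m)))
  | [], a => by simp
  | b :: l, a => by
    rw [List.foldl_cons, List.any_cons, pv_lt_foldl_max v l (max a b)]
    have h : decide (v < max a b) = (decide (v < a) || decide (v < b)) := by
      by_cases h1 : v < a <;> by_cases h2 : v < b <;>
        simp [h1, h2]
    rw [h, Bool.or_assoc]

-- ===== VERDICT (by name: the statement is the Claim_ definition above) =====
theorem greater_than_spec : Claim_equal_greater_than := by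
  intro fieldvalues value _
  unfold Spec_greater_than greater_than greater_than_alt
  cases fieldvalues with
  | nil => rfl
  | cons x t =>
    rw [if_neg (by simp)]
    rw [pv_any_range (x :: t)
      (fun f => decide (value < PySem.List.pyGetD ((PySem.Str.split? f ";").getD []) 0 ""))]
    simp only [List.map_cons, PySem.List.max?_id_cons, List.isEmpty_cons, Bool.not_false,
      Bool.true_and, List.any_cons]
    rw [pv_lt_foldl_max, List.any_map]
    rfl
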